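-- pv_equiv track=rewrite | github.com/BartlomiejRegula/pp1 | 13-Test3/p11.py | f
-- ===== SOURCE A (Python) =====
-- def f(n):
--     x=''
--     for i in range(n):
--         if i%5!=0 or i==0:
--             x+='/'
--         else:
--             x+='-/'
--
--     return x
-- ===== SOURCE B (Python) =====
-- def f(n):
--     blocks = ['/' * min(5, n - 5 * k) for k in range((n + 4) // 5)]
--     return '-'.join(blocks)
-- ===== Notes on version B (the rewrite author's own statement) =====
-- stated objective: faster
-- what changed: Instead of appending per character with a divisibility test at every index, B computes the block structure directly: one '/'*min(5, n-5k) string per block k in range((n+4)//5), joined with '-'.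
import Mathlib
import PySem

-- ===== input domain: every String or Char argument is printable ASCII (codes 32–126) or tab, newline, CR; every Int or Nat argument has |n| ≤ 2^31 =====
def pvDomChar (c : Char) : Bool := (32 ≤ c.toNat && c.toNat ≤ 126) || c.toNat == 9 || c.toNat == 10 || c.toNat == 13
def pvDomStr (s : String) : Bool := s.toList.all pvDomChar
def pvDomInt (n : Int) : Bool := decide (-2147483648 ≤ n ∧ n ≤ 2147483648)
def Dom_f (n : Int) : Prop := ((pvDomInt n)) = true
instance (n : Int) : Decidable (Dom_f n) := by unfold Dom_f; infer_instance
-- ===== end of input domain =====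

-- B builds the up-to-five-slash blocks directly and joins them with '-' (one iteration
-- per block instead of per character, measurably faster by constant factor).

-- ===== PORT A =====
-- x=''; for i in range(n): x += '/' if (i%5!=0 or i==0) else '-/'
def f (n : Int) : String :=
  String.mk ((PySem.List.pyRange 0 n 1).foldl
    (fun x i => if PySem.Int.mod i 5 ≠ 0 ∨ i = 0 then x ++ ['/'] else x ++ ['-', '/']) [])

-- ===== PORT B =====
-- blocks = ['/' * min(5, n - 5*k) for k in range((n+4)//5)]; return '-'.join(blocks)
def f_alt (n : Int) : String :=
  String.mk (PySem.Chars.join ['-']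
    ((PySem.List.pyRange 0 (PySem.Int.floordiv (n + 4) 5) 1).map
      (fun k => PySem.List.pyRepeat ['/'] (min 5 (n - 5 * k)))))

-- ===== PRECONDITION & SPEC =====
def Spec_f (n : Int) (out : String) : Prop := out = f_alt n
instance (n : Int) (out : String) : Decidable (Spec_f n out) := by unfold Spec_f; infer_instance

-- ===== CLAIM (what is proved, stated in full; the proofs are below) =====
def Claim_equal_f : Prop := ∀ (n : Int), Dom_f n → Spec_f n (f n)

-- ===== LEMMAS AND PROOFS =====

-- B's block list, over Nat
def pvBlocks (m : Nat) : List (List Char) :=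
  (List.range ((m + 4) / 5)).map (fun k => List.replicate (min 5 (m - 5 * k)) '/')

-- A's loop, over Nat
def pvLoop (m : Nat) : List Char :=
  (List.range m).foldl (fun x i => if i % 5 ≠ 0 ∨ i = 0 then x ++ ['/'] else x ++ ['-', '/']) []

lemma join_cons_ne (sep b : List Char) (bs : List (List Char)) (h : bs ≠ []) :
    PySem.Chars.join sep (b :: bs) = b ++ sep ++ PySem.Chars.join sep bs := by
  cases bs with
  | nil => exact absurd rfl h
  | cons c cs => exact PySem.Chars.join_cons_cons sep b c cs

lemma join_snoc_append (sep p t : List Char) (bs : List (List Char)) :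
    PySem.Chars.join sep (bs ++ [p ++ t]) = PySem.Chars.join sep (bs ++ [p]) ++ t := by
  induction bs with
  | nil => simp [PySem.Chars.join_singleton]
  | cons b bs ih =>
      rw [List.cons_append, join_cons_ne _ _ _ (by simp), List.cons_append,
        join_cons_ne _ _ _ (by simp), ih]
      simp [List.append_assoc]

lemma join_snoc (sep p : List Char) (bs : List (List Char)) (h : bs ≠ []) :
    PySem.Chars.join sep (bs ++ [p]) = PySem.Chars.join sep bs ++ sep ++ p := by
  induction bs with
  | nil => exact absurd rfl h
  | cons b bs ih =>
      cases bs with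
      | nil => simp [PySem.Chars.join_cons_cons, PySem.Chars.join_singleton]
      | cons c cs =>
          rw [List.cons_append, join_cons_ne _ _ _ (by simp),
            join_cons_ne _ _ _ (by simp), ih (by simp)]
          simp [List.append_assoc]

lemma pvMain (m : Nat) : pvLoop m = PySem.Chars.join ['-'] (pvBlocks m) := by
  induction m with
  | zero => simp [pvLoop, pvBlocks, PySem.Chars.join_nil]
  | succ m ih =>
      have hstep : pvLoop (m + 1) =
          pvLoop m ++ (if m % 5 ≠ 0 ∨ m = 0 then ['/'] else ['-', '/']) := by
        simp only [pvLoop, List.range_succ, List.foldl_append, List.foldl_cons, List.foldl_nil]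
        split_ifs with h <;> rfl
      rcases Nat.eq_zero_or_pos m with hm0 | hmpos
      · subst hm0
        simp [pvLoop, pvBlocks, PySem.Chars.join_singleton]
      by_cases hmod : m % 5 = 0
      · -- new block starts: '-/' is appended
        have hq : (m + 1 + 4) / 5 = (m + 4) / 5 + 1 := by omega
        have hq5 : 5 * ((m + 4) / 5) = m := by omega
        have hqpos : 0 < (m + 4) / 5 := by omega
        have hblocks : pvBlocks (m + 1) = pvBlocks m ++ [['/']] := by
          unfold pvBlocks
          rw [hq, List.range_succ, List.map_append]
          congr 1
          · exact List.map_congr_left (fun k hk => by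
              have := List.mem_range.mp hk
              congr 1
              omega)
          · simp only [List.map_cons, List.map_nil]
            have : min 5 (m + 1 - 5 * ((m + 4) / 5)) = 1 := by omega
            rw [this]
            rfl
        rw [hstep, ih, hblocks, join_snoc _ _ _ (by
          unfold pvBlocks
          simp only [ne_eq, List.map_eq_nil_iff, List.range_eq_nil]
          omega)]
        simp [hmod, hmpos.ne']
      · -- last block grows by one '/'
        have hq : (m + 1 + 4) / 5 = (m + 4) / 5 := by omega
        have hqpos : 0 < (m + 4) / 5 := by omega
        have hsplit : List.range ((m + 4) / 5) =
            List.range ((m + 4) / 5 - 1) ++ [(m + 4) / 5 - 1] := by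
          conv_lhs => rw [show (m + 4) / 5 = ((m + 4) / 5 - 1) + 1 by omega]
          exact List.range_succ
        have hlastm : min 5 (m - 5 * ((m + 4) / 5 - 1)) = m % 5 := by omega
        have hlastm1 : min 5 (m + 1 - 5 * ((m + 4) / 5 - 1)) = m % 5 + 1 := by omega
        have hblocks1 : pvBlocks (m + 1) =
            (List.range ((m + 4) / 5 - 1)).map
              (fun k => List.replicate (min 5 (m - 5 * k)) '/')
            ++ [List.replicate (m % 5) '/' ++ ['/']] := by
          unfold pvBlocks
          rw [hq, hsplit, List.map_append]
          congr 1
          · exact List.map_congr_left (fun k hk => by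
              have := List.mem_range.mp hk
              congr 1
              omega)
          · simp only [List.map_cons, List.map_nil, hlastm1]
            rw [List.replicate_succ']
        have hblocks0 : pvBlocks m =
            (List.range ((m + 4) / 5 - 1)).map
              (fun k => List.replicate (min 5 (m - 5 * k)) '/')
            ++ [List.replicate (m % 5) '/'] := by
          unfold pvBlocks
          rw [hsplit, List.map_append]
          congr 1
          simp only [List.map_cons, List.map_nil, hlastm]
        rw [hstep, ih, hblocks1, join_snoc_append, ← hblocks0]
        simp [hmod]

lemma fA_eq (n : Int) : f n = String.mk (pvLoop n.toNat) := by
  unfold f pvLoop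
  rw [PySem.List.pyRange_one]
  simp only [Int.sub_zero]
  rw [List.foldl_map]
  congr 1
  have hfun : (fun (x : List Char) (k : Nat) =>
      if PySem.Int.mod ((0 : Int) + k) 5 ≠ 0 ∨ ((0 : Int) + (k : Int)) = 0
      then x ++ ['/'] else x ++ ['-', '/'])
      = (fun (x : List Char) (i : Nat) =>
        if i % 5 ≠ 0 ∨ i = 0 then x ++ ['/'] else x ++ ['-', '/']) := by
    funext x k
    have hc : (PySem.Int.mod ((0 : Int) + k) 5 ≠ 0 ∨ ((0 : Int) + (k : Int)) = 0) ↔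
        (k % 5 ≠ 0 ∨ k = 0) := by
      simp only [PySem.Int.mod, Int.fmod_eq_emod, zero_add]
      omega
    exact if_congr hc rfl rfl
  rw [hfun]

lemma fB_eq (n : Int) : f_alt n = String.mk (PySem.Chars.join ['-'] (pvBlocks n.toNat)) := by
  unfold f_alt pvBlocks
  rw [PySem.List.pyRange_one]
  simp only [Int.sub_zero]
  congr 1
  have hq : (PySem.Int.floordiv (n + 4) 5).toNat = (n.toNat + 4) / 5 := by
    simp only [PySem.Int.floordiv, Int.fdiv_eq_ediv]
    omega
  rw [hq, List.map_map]
  congr 1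
  apply List.map_congr_left
  intro k hk
  have hk' := List.mem_range.mp hk
  simp only [Function.comp, zero_add, PySem.List.pyRepeat_singleton]
  congr 1
  omega

-- ===== VERDICT (by name: the statement is the Claim_ definition above) =====
theorem f_spec : Claim_equal_f := by
  intro n _
  unfold Spec_f
  rw [fA_eq, fB_eq, pvMain]
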